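-- pv_equiv track=rewrite | github.com/zoeezhang3/CodePath | session2_unit2.py | is_authentic_collection
-- ===== SOURCE A (Python) =====
-- from collections import Counter, defaultdict
--
-- def is_authentic_collection(art_pieces):
--   if not art_pieces:
--     return False
--
--   max_num = max(art_pieces)
--
--   if len(art_pieces) != max_num+1:
--     return False
--
--   count = Counter(art_pieces)
--
--   for i in range(1, max_num):
--     if count[i] != 1:
--       return False
--
--   return count[max_num] == 2
-- ===== SOURCE B (Python) =====
-- def is_authentic_collection(art_pieces):
--   n = len(art_pieces) - 1
--   return n >= 1 and sorted(art_pieces) == list(range(1, n)) + [n, n]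
-- ===== Notes on version B (the rewrite author's own statement) =====
-- stated objective: simpler
-- what changed: drops the empty/max/length guards and the Counter probe loop entirely: B derives the candidate maximum n = len-1 from the length alone and does one sort-and-compare against the canonical sequence [1..n-1, n, n]
import Mathlib
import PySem

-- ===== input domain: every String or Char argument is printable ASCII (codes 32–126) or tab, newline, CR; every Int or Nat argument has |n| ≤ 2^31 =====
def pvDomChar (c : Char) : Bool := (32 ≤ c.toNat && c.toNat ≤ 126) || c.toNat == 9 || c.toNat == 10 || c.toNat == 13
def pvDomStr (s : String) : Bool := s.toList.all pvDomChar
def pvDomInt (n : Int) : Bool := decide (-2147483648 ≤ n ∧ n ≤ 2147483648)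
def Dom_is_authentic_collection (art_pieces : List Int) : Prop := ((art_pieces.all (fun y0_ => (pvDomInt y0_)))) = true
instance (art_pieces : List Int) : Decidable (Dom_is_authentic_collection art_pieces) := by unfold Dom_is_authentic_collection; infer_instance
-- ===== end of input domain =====

-- B drops A's empty/max/length guards and the Counter probe loop: it derives n = len-1 from the
-- length alone and does one sort-and-compare against the canonical sequence [1..n-1, n, n].
-- ===== PORT A =====
def is_authentic_collection (art_pieces : List Int) : Bool :=
  if art_pieces.isEmpty then false
  else
    match PySem.List.max? art_pieces (fun x => x) with
    | none => false  -- unreachable: the list is nonempty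
    | some max_num =>
      if (art_pieces.length : Int) ≠ max_num + 1 then false
      else
        let count := PySem.Dict.counter art_pieces
        if (PySem.List.pyRange 1 max_num 1).all (fun i => count.getD i 0 == 1) then
          count.getD max_num 0 == 2
        else false

-- ===== PORT B =====
def is_authentic_collection_alt (art_pieces : List Int) : Bool :=
  let n : Int := (art_pieces.length : Int) - 1
  decide (1 ≤ n) &&
    (PySem.List.sorted art_pieces (fun x => x) false == PySem.List.pyRange 1 n 1 ++ [n, n])

-- ===== PRECONDITION & SPEC =====
def Spec_is_authentic_collection (art_pieces : List Int) (out : Bool) : Prop := out = is_authentic_collection_alt art_pieces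
instance (art_pieces : List Int) (out : Bool) : Decidable (Spec_is_authentic_collection art_pieces out) := by unfold Spec_is_authentic_collection; infer_instance

-- ===== CLAIM (what is proved, stated in full; the proofs are below) =====
def Claim_equal_is_authentic_collection : Prop := ∀ (art_pieces : List Int), Dom_is_authentic_collection art_pieces → Spec_is_authentic_collection art_pieces (is_authentic_collection art_pieces)

-- ===== LEMMAS AND PROOFS =====

-- how often each value occurs in the canonical expected list
lemma count_canon (m a : Int) :
    (PySem.List.pyRange 1 m 1 ++ [m, m]).count a =
      (if 1 ≤ a ∧ a < m then 1 else 0) + (if a = m then 2 else 0) := by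
  rw [List.count_append]
  congr 1
  · by_cases h : 1 ≤ a ∧ a < m
    · simp only [if_pos h]
      exact List.count_eq_one_of_mem (PySem.List.nodup_pyRange_one 1 m)
        (PySem.List.mem_pyRange_one.mpr h)
    · simp only [if_neg h]
      exact List.count_eq_zero_of_not_mem (fun hm => h (PySem.List.mem_pyRange_one.mp hm))
  · by_cases h : a = m
    · subst h; simp
    · simp [h, Ne.symm h]

lemma pairwise_canon (m : Int) :
    (PySem.List.pyRange 1 m 1 ++ [m, m]).Pairwise (· ≤ ·) := by
  rw [List.pairwise_append]
  refine ⟨(PySem.List.pairwise_lt_pyRange_one 1 m).imp le_of_lt, by simp, ?_⟩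
  intro a ha b hb
  have : a < m := (PySem.List.mem_pyRange_one.mp ha).2
  have : b = m := by simpa using hb
  omega

-- members of the canonical list are between 1 and m
lemma mem_canon {m a : Int} (h : a ∈ PySem.List.pyRange 1 m 1 ++ [m, m]) : a ≤ m := by
  rcases List.mem_append.mp h with h | h
  · exact le_of_lt (PySem.List.mem_pyRange_one.mp h).2
  · simp only [List.mem_cons] at h
    rcases h with h | h | h <;> simp_all

-- if B's sort-and-compare succeeds then xs is a permutation of the canonical list
lemma perm_of_sorted_eq {xs : List Int} {m : Int}
    (hs : PySem.List.sorted xs (fun x => x) false = PySem.List.pyRange 1 m 1 ++ [m, m]) :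
    (PySem.List.pyRange 1 m 1 ++ [m, m]).Perm xs :=
  hs ▸ (PySem.List.sorted_perm xs (fun x => x) false)

-- the core equivalence of the two checks, under the length guard
lemma core (xs : List Int) (m : Int) (hlen : (xs.length : Int) = m + 1) :
    ((PySem.List.pyRange 1 m 1).all (fun i => ((xs.count i : Int)) == 1) &&
       ((xs.count m : Int) == 2)) =
    (PySem.List.sorted xs (fun x => x) false == PySem.List.pyRange 1 m 1 ++ [m, m]) := by
  set L := PySem.List.pyRange 1 m 1 ++ [m, m] with hL
  apply Bool.coe_iff_coe.mp
  simp only [Bool.and_eq_true, List.all_eq_true, beq_iff_eq]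
  constructor
  · rintro ⟨hall, hm⟩
    have hle : (L : Multiset Int) ≤ (xs : Multiset Int) := by
      rw [Multiset.le_iff_count]
      intro a
      simp only [Multiset.coe_count]
      rw [hL, count_canon]
      by_cases h1 : 1 ≤ a ∧ a < m
      · have hc := hall a (PySem.List.mem_pyRange_one.mpr h1)
        have hnm : ¬ a = m := by omega
        rw [if_pos h1, if_neg hnm]
        omega
      · by_cases h2 : a = m
        · rw [if_neg h1, if_pos h2, h2]
          omega
        · rw [if_neg h1, if_neg h2]
          omega
    have hcard : Multiset.card (xs : Multiset Int) ≤ Multiset.card (L : Multiset Int) := by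
      rw [hL]
      simp only [Multiset.coe_card, List.length_append,
        PySem.List.length_pyRange_one, List.length_cons, List.length_nil]
      omega
    have heq : (L : Multiset Int) = (xs : Multiset Int) :=
      Multiset.eq_of_le_of_card_le hle hcard
    have hperm : L.Perm xs := Multiset.coe_eq_coe.mp heq
    have hpw : L.Pairwise (· ≤ ·) := by rw [hL]; exact pairwise_canon m
    exact PySem.List.sorted_id_eq_of_perm_of_pairwise xs L hperm hpw
  · intro hs
    have hperm : L.Perm xs := perm_of_sorted_eq hs
    constructor
    · intro i hi
      have h1 := PySem.List.mem_pyRange_one.mp hi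
      have hc := hperm.count_eq i
      rw [hL, count_canon, if_pos h1, if_neg (by omega : ¬ i = m)] at hc
      omega
    · have hc := hperm.count_eq m
      rw [hL, count_canon, if_neg (by omega : ¬ (1 ≤ m ∧ m < m)), if_pos rfl] at hc
      omega

-- if B's comparison succeeds with n = len-1, then max of xs is n and 1 ≤ n
lemma sorted_eq_facts {xs : List Int} {m n : Int}
    (hmax : PySem.List.max? xs (fun x => x) = some m)
    (hlen : (xs.length : Int) = n + 1)
    (hs : PySem.List.sorted xs (fun x => x) false = PySem.List.pyRange 1 n 1 ++ [n, n]) :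
    m = n ∧ 1 ≤ n := by
  have hperm := perm_of_sorted_eq hs
  have hn1 : (1:Int) ≤ n := by
    by_contra hlt
    have h0 : n < 1 := by omega
    have hL : (PySem.List.pyRange 1 n 1 ++ [n, n]).length = xs.length :=
      List.Perm.length_eq hperm
    have : PySem.List.pyRange 1 n 1 = [] := by
      have := PySem.List.length_pyRange_one 1 n
      cases hc : PySem.List.pyRange 1 n 1 with
      | nil => rfl
      | cons a t =>
        have := PySem.List.mem_pyRange_one.mp (hc ▸ List.mem_cons_self (a := a) (l := t))
        omega
    rw [this] at hL
    simp at hL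
    omega
  have hmxs : m ∈ xs := PySem.List.max?_mem hmax
  have hmL : m ∈ PySem.List.pyRange 1 n 1 ++ [n, n] := hperm.mem_iff.mpr hmxs
  have hmn : m ≤ n := mem_canon hmL
  have hnxs : n ∈ xs := hperm.subset (by simp)
  have hnm : n ≤ m := PySem.List.max?_isMax hmax n hnxs
  exact ⟨le_antisymm hmn hnm, hn1⟩

-- ===== VERDICT (by name: the statement is the Claim_ definition above) =====
theorem is_authentic_collection_spec : Claim_equal_is_authentic_collection := by
  intro xs _
  unfold Spec_is_authentic_collection is_authentic_collection is_authentic_collection_alt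
  simp only
  split
  · -- empty list: B's 1 ≤ len-1 test fails
    rename_i hemp
    have : xs = [] := List.isEmpty_iff.mp hemp
    subst this
    simp
  · rename_i hemp
    cases hmax : PySem.List.max? xs (fun x => x) with
    | none =>
      exact absurd ((PySem.List.max?_eq_none_iff xs _).mp hmax) (by simpa using hemp)
    | some m =>
      simp only
      split
      · -- length guard fails in A: show B's comparison cannot succeed either
        rename_i hne
        rcases hbs : (PySem.List.sorted xs (fun x => x) false ==
            PySem.List.pyRange 1 ((xs.length : Int) - 1) 1 ++
              [(xs.length : Int) - 1, (xs.length : Int) - 1]) with _ | _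
        · simp
        · have hs := beq_iff_eq.mp hbs
          have := (sorted_eq_facts hmax (by omega) hs).1
          omega
      · -- length guard holds: n = m, reduce to the core count/sort equivalence
        rename_i hlen
        have hlen' : (xs.length : Int) = m + 1 := by omega
        have hnm : (xs.length : Int) - 1 = m := by omega
        rw [hnm]
        simp only [PySem.Dict.getD_counter]
        rw [← core xs m hlen']
        rcases hall : (PySem.List.pyRange 1 m 1).all (fun i => ((xs.count i : Int)) == 1) with _ | _
        · simp
        · rcases hcm : (((xs.count m : Int)) == 2) with _ | _
          · simp
          · -- both A-side checks hold; core says the sort comparison holds, so 1 ≤ m by sorted_eq_facts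
            have hs : PySem.List.sorted xs (fun x => x) false =
                PySem.List.pyRange 1 m 1 ++ [m, m] := by
              have := core xs m hlen'
              rw [hall, hcm] at this
              exact beq_iff_eq.mp this.symm
            have h1 := (sorted_eq_facts hmax hlen' hs).2
            simp [h1]
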